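-- pv_equiv track=rewrite | github.com/evgeniatrudova/vaccine_candidade_app | peptide_pipeline_app.py | trypsin_digest
-- ===== SOURCE A (Python) =====
-- def trypsin_digest(seq):
--     seq = str(seq)
--     peptides = []
--     start = 0
--     for i in range(len(seq)-1):
--         if seq[i] in ["K","R"] and seq[i+1] != "P":
--             peptides.append(seq[start:i+1])
--             start = i+1
--     peptides.append(seq[start:])
--     return peptides
-- ===== SOURCE B (Python) =====
-- def trypsin_digest(seq):
--     seq = str(seq)
--     peptides = []
--     acc = []
--     for c in seq:
--         if acc and acc[-1] in "KR" and c != "P":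
--             peptides.append("".join(acc))
--             acc = [c]
--         else:
--             acc.append(c)
--     peptides.append("".join(acc))
--     return peptides
-- ===== Notes on version B (the rewrite author's own statement) =====
-- stated objective: simpler
-- what changed: B replaces A's index loop with a start pointer and repeated slicing by a single pass over the characters that grows the current peptide in an accumulator and flushes it at each cleavage boundary, so no indices or slices are used.
import Mathlib
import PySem

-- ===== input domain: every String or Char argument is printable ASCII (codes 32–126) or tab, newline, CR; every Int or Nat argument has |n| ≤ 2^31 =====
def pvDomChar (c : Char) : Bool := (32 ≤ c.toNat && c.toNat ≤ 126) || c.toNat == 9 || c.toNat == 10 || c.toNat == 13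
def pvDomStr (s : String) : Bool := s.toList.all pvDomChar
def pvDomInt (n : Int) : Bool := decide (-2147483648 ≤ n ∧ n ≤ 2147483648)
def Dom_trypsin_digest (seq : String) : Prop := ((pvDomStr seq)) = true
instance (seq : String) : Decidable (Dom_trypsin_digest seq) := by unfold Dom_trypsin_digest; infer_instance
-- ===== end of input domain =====

-- B replaces A's index loop / start pointer / slicing by a single accumulator pass over the characters (objective: simpler).

-- ===== PORT A =====
-- the body of A's for-loop: check seq[i] in ["K","R"] and seq[i+1] != "P", then slice and move start
def trypsinStepA (s : List Char) (st : List String × Int) (i : Int) : List String × Int :=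
  match PySem.List.pyGet? s i, PySem.List.pyGet? s (i + 1) with
  | some c, some d =>
    if (c = 'K' ∨ c = 'R') ∧ d ≠ 'P' then
      (st.1 ++ [String.ofList (PySem.List.slice s (some st.2) (some (i + 1)))], i + 1)
    else st
  | _, _ => st

def trypsin_digest (seq : String) : List String :=
  let s := seq.toList
  let r := (PySem.List.pyRange 0 (PySem.Str.len seq - 1) 1).foldl (trypsinStepA s) ([], 0)
  r.1 ++ [String.ofList (PySem.List.slice s (some r.2) none)]

-- ===== PORT B =====
-- the body of B's for-loop: flush the accumulated peptide when its last char is K/R and c ≠ P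
def trypsinStepB (st : List String × List Char) (c : Char) : List String × List Char :=
  if (st.2.getLast? = some 'K' ∨ st.2.getLast? = some 'R') ∧ c ≠ 'P' then
    (st.1 ++ [String.ofList st.2], [c])
  else
    (st.1, st.2 ++ [c])

def trypsin_digest_alt (seq : String) : List String :=
  let r := seq.toList.foldl trypsinStepB ([], [])
  r.1 ++ [String.ofList r.2]

-- ===== PRECONDITION & SPEC =====
def Spec_trypsin_digest (seq : String) (out : List String) : Prop := out = trypsin_digest_alt seq
instance (seq : String) (out : List String) : Decidable (Spec_trypsin_digest seq out) := by unfold Spec_trypsin_digest; infer_instance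

-- ===== CLAIM (what is proved, stated in full; the proofs are below) =====
def Claim_equal_trypsin_digest : Prop := ∀ (seq : String), Dom_trypsin_digest seq → Spec_trypsin_digest seq (trypsin_digest seq)

-- ===== LEMMAS AND PROOFS =====

lemma getLast?_take_drop (s : List Char) (start j : Nat) (h1 : start < j) (h2 : j ≤ s.length) :
    ((s.drop start).take (j - start)).getLast? = some (s[j-1]'(by omega)) := by
  rw [List.getLast?_eq_getElem?]
  have hlen : ((s.drop start).take (j - start)).length = j - start := by
    simp [List.length_take, List.length_drop]; omega
  rw [hlen, List.getElem?_take_of_lt (by omega), List.getElem?_drop]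
  have : start + (j - start - 1) = j - 1 := by omega
  rw [this, List.getElem?_eq_getElem (by omega)]

lemma take_drop_succ (s : List Char) (start j : Nat) (h1 : start ≤ j) (h2 : j < s.length) :
    (s.drop start).take (j + 1 - start) =
      (s.drop start).take (j - start) ++ [s[j]'h2] := by
  have : j + 1 - start = (j - start) + 1 := by omega
  rw [this, List.take_add_one, List.getElem?_drop]
  have : start + (j - start) = j := by omega
  rw [this, List.getElem?_eq_getElem h2]
  rfl

-- the loop correspondence: A's remaining iterations from index j-1 with chunk s[start:j]
-- equal B's fold over the remaining characters s.drop j with accumulator s[start:j]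
lemma trypsin_loop_eq (s : List Char) :
    ∀ (k j start : Nat) (peps : List String),
      j + k = s.length → 1 ≤ j → start < j →
      (let r := (PySem.List.pyRange ((j : Int) - 1) ((s.length : Int) - 1) 1).foldl
          (trypsinStepA s) (peps, (start : Int));
        r.1 ++ [String.ofList (PySem.List.slice s (some r.2) none)]) =
      (let r := (s.drop j).foldl trypsinStepB (peps, (s.drop start).take (j - start));
        r.1 ++ [String.ofList r.2]) := by
  intro k
  induction k with
  | zero =>
    intro j start peps hjk hj hstart
    have hj' : j = s.length := by omega
    subst hj'
    rw [PySem.List.pyRange_one_eq_nil (by omega)]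
    simp only [List.foldl_nil, List.drop_length, PySem.List.slice_from_natCast]
    rw [List.take_of_length_le (by simp [List.length_drop])]
  | succ k ih =>
    intro j start peps hjk hj hstart
    have hjn : j < s.length := by omega
    have hj1 : j - 1 < s.length := by omega
    rw [PySem.List.pyRange_one_cons (by omega), List.foldl_cons]
    have hd : s.drop j = s[j]'hjn :: s.drop (j + 1) := List.drop_eq_getElem_cons hjn
    rw [hd, List.foldl_cons]
    have hgetA : PySem.List.pyGet? s ((j : Int) - 1) = some (s[j-1]'hj1) := by
      have : (j : Int) - 1 = ((j - 1 : Nat) : Int) := by omega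
      rw [this, PySem.List.pyGet?_natCast, List.getElem?_eq_getElem hj1]
    have hgetA' : PySem.List.pyGet? s ((j : Int) - 1 + 1) = some (s[j]'hjn) := by
      have : (j : Int) - 1 + 1 = ((j : Nat) : Int) := by omega
      rw [this, PySem.List.pyGet?_natCast, List.getElem?_eq_getElem hjn]
    have hlast := getLast?_take_drop s start j hstart (by omega)
    by_cases hcond : (s[j-1]'hj1 = 'K' ∨ s[j-1]'hj1 = 'R') ∧ s[j]'hjn ≠ 'P'
    · -- cleavage: A appends the slice and moves start to j; B flushes the accumulator
      have hA : trypsinStepA s (peps, (start : Int)) ((j : Int) - 1) =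
          (peps ++ [String.ofList ((s.drop start).take (j - start))], (j : Int)) := by
        rw [trypsinStepA, hgetA, hgetA']
        simp only [if_pos hcond]
        have e1 : (j : Int) - 1 + 1 = ((j : Nat) : Int) := by omega
        rw [e1, PySem.List.slice_natCast]
      have hB : trypsinStepB (peps, (s.drop start).take (j - start)) (s[j]'hjn) =
          (peps ++ [String.ofList ((s.drop start).take (j - start))], [s[j]'hjn]) := by
        rw [trypsinStepB]
        simp only [hlast, Option.some.injEq]
        rw [if_pos hcond]
      rw [hA, hB]
      have := ih (j + 1) j (peps ++ [String.ofList ((s.drop start).take (j - start))])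
        (by omega) (by omega) (by omega)
      have e2 : ((j + 1 : Nat) : Int) - 1 = (j : Int) - 1 + 1 := by push_cast; ring
      rw [e2] at this
      have e3 : (s.drop j).take (j + 1 - j) = [s[j]'hjn] := by
        have : j + 1 - j = 1 := by omega
        rw [this, hd]; rfl
      rw [e3] at this
      exact this
    · -- no cleavage: both states carry on, B appends the character to the accumulator
      have hA : trypsinStepA s (peps, (start : Int)) ((j : Int) - 1) = (peps, (start : Int)) := by
        rw [trypsinStepA, hgetA, hgetA']
        simp only [if_neg hcond]
      have hB : trypsinStepB (peps, (s.drop start).take (j - start)) (s[j]'hjn) =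
          (peps, (s.drop start).take (j - start) ++ [s[j]'hjn]) := by
        rw [trypsinStepB]
        simp only [hlast, Option.some.injEq]
        rw [if_neg hcond]
      rw [hA, hB]
      have := ih (j + 1) start peps (by omega) (by omega) (by omega)
      have e2 : ((j + 1 : Nat) : Int) - 1 = (j : Int) - 1 + 1 := by push_cast; ring
      rw [e2] at this
      rw [take_drop_succ s start j (by omega) hjn] at this
      exact this

-- ===== VERDICT (by name: the statement is the Claim_ definition above) =====
theorem trypsin_digest_spec : Claim_equal_trypsin_digest := by
  intro seq _
  show trypsin_digest seq = trypsin_digest_alt seq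
  rw [trypsin_digest, trypsin_digest_alt]
  rcases hs : seq.toList with _ | ⟨c, t⟩
  · simp [hs]
  · have hlen : PySem.Str.len seq - 1 = ((c :: t).length : Int) - 1 := by
      simp [PySem.Str.len_eq, hs]
    have hne : (c :: t).length = 1 + t.length := by simp; omega
    have := trypsin_loop_eq (c :: t) t.length 1 0 [] (by omega) (by omega) (by omega)
    simp only [hlen]
    have e1 : ((1 : Nat) : Int) - 1 = 0 := by omega
    rw [e1] at this
    have eB : trypsinStepB ([], []) c = ([], [c]) := by
      rw [trypsinStepB]; simp
    simp only [List.foldl_cons, eB]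
    have e2 : ((c :: t).drop 0).take (1 - 0) = [c] := rfl
    have e3 : (c :: t).drop 1 = t := rfl
    rw [e2, e3] at this
    exact this
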